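-- pv_equiv track=rewrite | github.com/lsy0882/edge-analysis-module_lsy_lab | detector/event/kidnapping/main.py | boxOverlapCheck
-- ===== SOURCE A (Python) =====
-- def boxOverlapCheck(coord1, coord2, type):
--
--     if type == 2:
--         if (coord1[2] * coord1[3]) >= (coord2[2] * coord2[3]):
--             return 0
--     elif type == 1:
--         p1 = coord1[2] * coord1[3]
--         p2 = coord2[2] * coord2[3]
--         if p1 != p2:
--             if p1 > p2:
--                 bigger = p1
--                 smaller = p2
--             else :
--                 bigger = p2
--                 smaller = p1
--             if bigger > 3 * smaller:
--                 return 0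
--
--     coord = []
--     coord.append(coord1)
--     coord.append(coord2)
--     eventFlag = 0
--     for target in range(2):
--         targetCoord = []
--         targetCoord = ((coord[target][0], coord[target][1]),
--             (coord[target][0], coord[target][1] + coord[target][3]),
--             (coord[target][0] + coord[target][2], coord[target][1]),
--             (coord[target][0] + coord[target][2], coord[target][1] + coord[target][3]))
--         if target < 1 :
--             other = 1
--         else :
--             other = 0
--         for i in range(4):
--             if targetCoord[i][0] >= coord[other][0] and targetCoord[i][0] <= (coord[other][0] + coord[other][2]):
--                 if targetCoord[i][1] >= coord[other][1] and targetCoord[i][1] <= (coord[other][1] + coord[other][3]):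
--                     eventFlag = 1
--
--     return eventFlag
-- ===== SOURCE B (Python) =====
-- def _corner_inside(a, b):
--     # some x-edge of a lies in b's inclusive x-span AND some y-edge of a in b's y-span
--     x = (b[0] <= a[0] <= b[0] + b[2]) or (b[0] <= a[0] + a[2] <= b[0] + b[2])
--     y = (b[1] <= a[1] <= b[1] + b[3]) or (b[1] <= a[1] + a[3] <= b[1] + b[3])
--     return x and y
--
-- def boxOverlapCheck(coord1, coord2, type):
--     if type == 2:
--         if coord1[2] * coord1[3] >= coord2[2] * coord2[3]:
--             return 0
--     elif type == 1:
--         p1 = coord1[2] * coord1[3]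
--         p2 = coord2[2] * coord2[3]
--         if p1 != p2 and max(p1, p2) > 3 * min(p1, p2):
--             return 0
--     return 1 if _corner_inside(coord1, coord2) or _corner_inside(coord2, coord1) else 0
-- ===== Notes on version B (the rewrite author's own statement) =====
-- stated objective: simpler
-- what changed: The 2x4 corner loop with an eventFlag accumulator is replaced by a closed-form edge-interval test: a helper checks whether some x-edge of one box lies in the other's inclusive x-span and some y-edge in its y-span, applied symmetrically; distributivity makes this equal to the corner OR.
import Mathlib
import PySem

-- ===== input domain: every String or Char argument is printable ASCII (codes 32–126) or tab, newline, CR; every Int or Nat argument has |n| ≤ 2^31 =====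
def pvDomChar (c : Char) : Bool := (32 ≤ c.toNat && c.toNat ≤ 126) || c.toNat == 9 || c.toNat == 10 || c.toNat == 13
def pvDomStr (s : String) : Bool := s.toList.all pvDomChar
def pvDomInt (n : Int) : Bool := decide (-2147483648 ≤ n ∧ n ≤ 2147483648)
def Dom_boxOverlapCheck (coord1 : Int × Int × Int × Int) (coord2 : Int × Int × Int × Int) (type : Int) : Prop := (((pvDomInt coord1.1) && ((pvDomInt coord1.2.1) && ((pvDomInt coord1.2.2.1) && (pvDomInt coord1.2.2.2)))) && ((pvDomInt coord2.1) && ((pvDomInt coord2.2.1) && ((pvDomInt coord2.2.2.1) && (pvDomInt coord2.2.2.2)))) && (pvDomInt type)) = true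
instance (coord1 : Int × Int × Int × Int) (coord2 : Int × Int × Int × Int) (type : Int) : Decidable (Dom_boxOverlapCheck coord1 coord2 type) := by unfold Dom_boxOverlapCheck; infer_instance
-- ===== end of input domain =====

-- B replaces A's 2x4 corner loop with a closed-form symmetric edge-interval test (simpler; return value only).


-- ===== PORT A =====
-- A's corner loop after the early returns: for target in range(2): build the 4 corners,
-- test each against the other box, setting eventFlag.
def pvCornerLoopA (coord1 coord2 : Int × Int × Int × Int) : Int :=
  let coord : List (Int × Int × Int × Int) := [coord1, coord2]
  (PySem.List.pyRange 0 2 1).foldl (fun eventFlag target =>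
    let ct := coord.getD target.toNat ((0, 0, 0, 0) : Int × Int × Int × Int)   -- index is always 0 or 1; default unreachable
    let targetCoord : List (Int × Int) :=
      [(ct.1, ct.2.1), (ct.1, ct.2.1 + ct.2.2.2),
       (ct.1 + ct.2.2.1, ct.2.1), (ct.1 + ct.2.2.1, ct.2.1 + ct.2.2.2)]
    let other : Nat := if target < 1 then 1 else 0
    let co := coord.getD other ((0, 0, 0, 0) : Int × Int × Int × Int)
    (PySem.List.pyRange 0 4 1).foldl (fun ef i =>
      let p := targetCoord.getD i.toNat ((0, 0) : Int × Int)
      if p.1 ≥ co.1 ∧ p.1 ≤ co.1 + co.2.2.1 then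
        if p.2 ≥ co.2.1 ∧ p.2 ≤ co.2.1 + co.2.2.2 then 1 else ef
      else ef) eventFlag) 0

def boxOverlapCheck (coord1 : Int × Int × Int × Int) (coord2 : Int × Int × Int × Int) (type : Int) : Int :=
  if type = 2 then
    if coord1.2.2.1 * coord1.2.2.2 ≥ coord2.2.2.1 * coord2.2.2.2 then 0
    else pvCornerLoopA coord1 coord2
  else if type = 1 then
    let p1 := coord1.2.2.1 * coord1.2.2.2
    let p2 := coord2.2.2.1 * coord2.2.2.2
    if p1 ≠ p2 then
      let bs := if p1 > p2 then (p1, p2) else (p2, p1)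
      if bs.1 > 3 * bs.2 then 0 else pvCornerLoopA coord1 coord2
    else pvCornerLoopA coord1 coord2
  else pvCornerLoopA coord1 coord2

-- ===== PORT B =====
def pvCornerInside (a b : Int × Int × Int × Int) : Bool :=
  ((b.1 ≤ a.1 && a.1 ≤ b.1 + b.2.2.1) || (b.1 ≤ a.1 + a.2.2.1 && a.1 + a.2.2.1 ≤ b.1 + b.2.2.1)) &&
  ((b.2.1 ≤ a.2.1 && a.2.1 ≤ b.2.1 + b.2.2.2) || (b.2.1 ≤ a.2.1 + a.2.2.2 && a.2.1 + a.2.2.2 ≤ b.2.1 + b.2.2.2))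

def boxOverlapCheck_alt (coord1 : Int × Int × Int × Int) (coord2 : Int × Int × Int × Int) (type : Int) : Int :=
  if type = 2 then
    if coord1.2.2.1 * coord1.2.2.2 ≥ coord2.2.2.1 * coord2.2.2.2 then 0
    else if pvCornerInside coord1 coord2 || pvCornerInside coord2 coord1 then 1 else 0
  else if type = 1 then
    let p1 := coord1.2.2.1 * coord1.2.2.2
    let p2 := coord2.2.2.1 * coord2.2.2.2
    if p1 ≠ p2 ∧ max p1 p2 > 3 * min p1 p2 then 0
    else if pvCornerInside coord1 coord2 || pvCornerInside coord2 coord1 then 1 else 0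
  else if pvCornerInside coord1 coord2 || pvCornerInside coord2 coord1 then 1 else 0

-- ===== PRECONDITION & SPEC =====
def Spec_boxOverlapCheck (coord1 : Int × Int × Int × Int) (coord2 : Int × Int × Int × Int) (type : Int) (out : Int) : Prop := out = boxOverlapCheck_alt coord1 coord2 type
instance (coord1 : Int × Int × Int × Int) (coord2 : Int × Int × Int × Int) (type : Int) (out : Int) : Decidable (Spec_boxOverlapCheck coord1 coord2 type out) := by unfold Spec_boxOverlapCheck; infer_instance

-- ===== CLAIM (what is proved, stated in full; the proofs are below) =====
def Claim_equal_boxOverlapCheck : Prop := ∀ (coord1 : Int × Int × Int × Int) (coord2 : Int × Int × Int × Int) (type : Int), Dom_boxOverlapCheck coord1 coord2 type → Spec_boxOverlapCheck coord1 coord2 type (boxOverlapCheck coord1 coord2 type)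

-- ===== LEMMAS AND PROOFS =====
theorem pvRange2 : PySem.List.pyRange 0 2 1 = [0, 1] := by decide
theorem pvRange4 : PySem.List.pyRange 0 4 1 = [0, 1, 2, 3] := by decide

theorem pvFoldlFlag {α : Type} (l : List α) (p q : α → Prop) [DecidablePred p] [DecidablePred q] (e : Int) :
    l.foldl (fun ef x => if p x then if q x then 1 else ef else ef) e
      = if ∃ x ∈ l, p x ∧ q x then 1 else e := by
  induction l generalizing e with
  | nil => simp
  | cons h t ih =>
      rcases Decidable.em (∃ x ∈ t, p x ∧ q x) with hex | hex
      · obtain ⟨x, hx, hpq⟩ := hex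
        have hc : ∃ y ∈ h :: t, p y ∧ q y := ⟨x, List.mem_cons_of_mem _ hx, hpq⟩
        have hex' : ∃ y ∈ t, p y ∧ q y := ⟨x, hx, hpq⟩
        rw [List.foldl_cons, ih, if_pos hex', if_pos hc]
      · have hiff : (∃ y ∈ h :: t, p y ∧ q y) ↔ p h ∧ q h := by
          constructor
          · rintro ⟨y, hy, hpq⟩
            rcases List.mem_cons.mp hy with rfl | hyt
            · exact hpq
            · exact absurd ⟨y, hyt, hpq⟩ hex
          · exact fun hpq => ⟨h, List.mem_cons_self, hpq⟩
        rw [List.foldl_cons, ih, if_neg hex]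
        by_cases hph : p h
        · by_cases hqh : q h
          · rw [if_pos hph, if_pos hqh, if_pos (hiff.mpr ⟨hph, hqh⟩)]
          · rw [if_pos hph, if_neg hqh, if_neg (fun hc => hqh (hiff.mp hc).2)]
        · rw [if_neg hph, if_neg (fun hc => hph (hiff.mp hc).1)]

theorem pvCornerLoopA_eq (c1 c2 : Int × Int × Int × Int) :
    pvCornerLoopA c1 c2 = if pvCornerInside c1 c2 || pvCornerInside c2 c1 then 1 else 0 := by
  obtain ⟨a0, a1, a2, a3⟩ := c1
  obtain ⟨b0, b1, b2, b3⟩ := c2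
  simp only [pvCornerLoopA, pvRange2, pvRange4]
  rw [List.foldl_cons, List.foldl_cons, List.foldl_nil, pvFoldlFlag, pvFoldlFlag]
  simp only [List.mem_cons, List.not_mem_nil, or_false, pvCornerInside]
  norm_num [List.getD, show ((0:Int).toNat) = 0 from rfl, show ((1:Int).toNat) = 1 from rfl,
    show ((2:Int).toNat) = 2 from rfl, show ((3:Int).toNat) = 3 from rfl]
  split_ifs <;>
    simp_all only [not_or, not_and, not_le] <;>
    omega

-- ===== VERDICT (by name: the statement is the Claim_ definition above) =====
theorem boxOverlapCheck_spec : Claim_equal_boxOverlapCheck := by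
  intro c1 c2 type _
  unfold Spec_boxOverlapCheck boxOverlapCheck boxOverlapCheck_alt
  simp only [pvCornerLoopA_eq]
  generalize c1.2.2.1 * c1.2.2.2 = p1
  generalize c2.2.2.1 * c2.2.2.2 = p2
  split_ifs <;> simp_all <;> omega
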